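-- pv_equiv track=rewrite | github.com/elrama-/VZcomp | VZcomp/utils.py | split_entangling
-- ===== SOURCE A (Python) =====
-- def split_entangling(script):
--     '''
--     Splits a QASM script into stages of 1Q gates and 2Q gates
--     '''
--     list_1Q = []
--     list_2Q = []
--     accum_1Q = []
--     for ii, line in enumerate(script):
--         if line[:2] == 'CZ':
--             if accum_1Q == []:
--                 list_2Q[-1] += ';'+ line
--             else:
--                 list_2Q.append(line)
--                 list_1Q.append(accum_1Q)
--                 accum_1Q = []
--         else:
--             accum_1Q.append(line)
--     list_1Q.append(accum_1Q)
--     return list_1Q, list_2Q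
-- ===== SOURCE B (Python) =====
-- def split_entangling(script):
--     '''
--     Splits a QASM script into stages of 1Q gates and 2Q gates
--     '''
--     list_1Q = []
--     list_2Q = []
--     pending = []
--     i, n = 0, len(script)
--     while i < n:
--         is_cz = script[i][:2] == 'CZ'
--         j = i
--         while j < n and (script[j][:2] == 'CZ') == is_cz:
--             j += 1
--         run = script[i:j]
--         if is_cz:
--             list_1Q.append(pending)
--             pending = []
--             list_2Q.append(';'.join(run))
--         else:
--             pending = run
--         i = j
--     list_1Q.append(pending)
--     return list_1Q, list_2Q
-- ===== Notes on version B (the rewrite author's own statement) =====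
-- stated objective: alternative
-- what changed: B first segments the script into maximal runs of CZ / non-CZ lines and emits one 2Q entry per CZ run via ';'.join, instead of A's per-line accumulator that patches list_2Q[-1] in place for each consecutive CZ line.
import Mathlib
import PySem

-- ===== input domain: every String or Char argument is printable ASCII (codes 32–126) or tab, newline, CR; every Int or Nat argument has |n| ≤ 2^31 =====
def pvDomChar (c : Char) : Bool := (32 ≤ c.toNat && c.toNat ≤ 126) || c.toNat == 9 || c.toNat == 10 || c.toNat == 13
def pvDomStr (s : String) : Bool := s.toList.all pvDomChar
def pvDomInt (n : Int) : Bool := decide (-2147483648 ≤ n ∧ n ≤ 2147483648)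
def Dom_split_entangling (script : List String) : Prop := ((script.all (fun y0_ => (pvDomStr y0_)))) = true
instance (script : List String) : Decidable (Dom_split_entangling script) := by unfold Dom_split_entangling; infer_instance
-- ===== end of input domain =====

-- B segments the script into maximal CZ/non-CZ runs and joins each CZ run once, instead of
-- A's per-line accumulator that patches list_2Q[-1]; alternative decomposition, same cost.


-- ===== PORT A =====
-- line[:2] == 'CZ'
def isCZ (line : String) : Bool :=
  PySem.Chars.slice line.toList none (some 2) == "CZ".toList

-- list_2Q[-1] += ';' + line  (Python raises IndexError on []; that case is outside Pre_,
-- the port leaves the list unchanged there)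
def updLastA : List String → String → List String
  | [], _ => []
  | [z], line => [z ++ (";" ++ line)]
  | z :: zs, line => z :: updLastA zs line

def stepA (st : List (List String) × List String × List String) (line : String) :
    List (List String) × List String × List String :=
  let (l1, l2, acc) := st
  if isCZ line then
    if acc == [] then (l1, updLastA l2 line, acc)
    else (l1 ++ [acc], l2 ++ [line], [])
  else (l1, l2, acc ++ [line])

def split_entangling (script : List String) : List (List String) × List String :=
  let (l1, l2, acc) := script.foldl stepA ([], [], [])
  (l1 ++ [acc], l2)

-- ===== PORT B =====
-- the inner scan of Source B: extend the current run while the key matches, else close it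
def goB (k : Bool) (run : List String) : List String → List (Bool × List String)
  | [] => [(k, run.reverse)]
  | y :: rest =>
    if isCZ y == k then goB k (y :: run) rest
    else (k, run.reverse) :: goB (isCZ y) [y] rest

def groupsB (script : List String) : List (Bool × List String) :=
  match script with
  | [] => []
  | x :: rest => goB (isCZ x) [x] rest

def stepB (st : List (List String) × List String × List String) (g : Bool × List String) :
    List (List String) × List String × List String :=
  let (l1, l2, pending) := st
  if g.1 then (l1 ++ [pending], l2 ++ [PySem.Str.join ";" g.2], [])
  else (l1, l2, g.2)

def split_entangling_alt (script : List String) : List (List String) × List String :=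
  let (l1, l2, pending) := (groupsB script).foldl stepB ([], [], [])
  (l1 ++ [pending], l2)

-- ===== PRECONDITION & SPEC =====
-- Pre_ excludes exactly the scripts whose first line starts with 'CZ': there A raises
-- IndexError (list_2Q[-1] on the still-empty list_2Q).
def Pre_split_entangling (script : List String) : Prop :=
  script.head?.all (fun x => !(x.toList.take 2 == "CZ".toList)) = true
instance (script : List String) : Decidable (Pre_split_entangling script) := by
  unfold Pre_split_entangling; infer_instance

def pvWitness_split_entangling : List String := ["X q0", "CZ q0,q1", "CZ q1,q2", "Y q1"]

def Spec_split_entangling (script : List String) (out : List (List String) × List String) : Prop := out = split_entangling_alt script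
instance (script : List String) (out : List (List String) × List String) : Decidable (Spec_split_entangling script out) := by unfold Spec_split_entangling; infer_instance

-- ===== CLAIM (what is proved, stated in full; the proofs are below) =====
def Claim_equal_split_entangling : Prop := ∀ (script : List String), Dom_split_entangling script → Pre_split_entangling script → Spec_split_entangling script (split_entangling script)

-- ===== LEMMAS AND PROOFS =====

theorem isCZ_eq_take (line : String) : isCZ line = (line.toList.take 2 == "CZ".toList) := by
  have h : PySem.Chars.slice line.toList none (some 2) = line.toList.take 2 := by
    rw [PySem.Chars.slice_eq_listSlice, show (2 : Int) = ((2 : Nat) : Int) by simp,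
      PySem.List.slice_to_natCast]
  rw [isCZ, h]

-- groupsB unfolds takeWhile/dropWhile-style on a cons
theorem goB_eq (l : List String) : ∀ (k : Bool) (run : List String),
    goB k run l = (k, run.reverse ++ l.takeWhile (fun y => isCZ y == k))
      :: groupsB (l.dropWhile (fun y => isCZ y == k)) := by
  induction l with
  | nil => intro k run; simp [goB, groupsB]
  | cons y rest ih =>
    intro k run
    by_cases hy : isCZ y = k
    · simp only [goB, List.takeWhile, List.dropWhile, hy, beq_self_eq_true, if_true, ih]
      simp
    · have hym : (isCZ y == k) = false := by simp [hy]
      simp only [goB, List.takeWhile, List.dropWhile, hym, Bool.false_eq_true, if_false]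
      simp [groupsB]

theorem groupsB_cons (x : String) (rest : List String) :
    groupsB (x :: rest) = (isCZ x, x :: rest.takeWhile (fun y => isCZ y == isCZ x))
      :: groupsB (rest.dropWhile (fun y => isCZ y == isCZ x)) := by
  rw [groupsB, goB_eq]
  simp

-- A's fold over a run of non-CZ lines just extends the accumulator
theorem foldA_nonCZ (g : List String) (h : ∀ x ∈ g, isCZ x = false) :
    ∀ l1 l2 acc, g.foldl stepA (l1, l2, acc) = (l1, l2, acc ++ g) := by
  induction g with
  | nil => intro l1 l2 acc; simp
  | cons x g ih =>
    intro l1 l2 acc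
    have hx : isCZ x = false := h x (by simp)
    simp only [List.foldl_cons, stepA, hx, Bool.false_eq_true, if_false]
    rw [ih (fun y hy => h y (by simp [hy]))]
    simp

-- prefix of String-appends distributes over the joining fold
theorem foldJoin_prefix (g : List String) :
    ∀ a c : String, g.foldl (fun b s => b ++ (";" ++ s)) (a ++ c)
      = a ++ g.foldl (fun b s => b ++ (";" ++ s)) c := by
  induction g with
  | nil => intro a c; simp
  | cons x g ih =>
    intro a c
    simp only [List.foldl_cons]
    rw [String.append_assoc, ih]

-- PySem.Str.join ";" on a nonempty run is the left fold of "++ ';' ++"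
theorem join_eq_foldl (g : List String) :
    ∀ x : String, PySem.Str.join ";" (x :: g)
      = g.foldl (fun b s => b ++ (";" ++ s)) x := by
  induction g with
  | nil =>
    intro x
    apply String.toList_injective
    simp [PySem.Str.toList_join, PySem.Chars.join_singleton]
  | cons y g ih =>
    intro x
    have h2 : PySem.Str.join ";" (x :: y :: g) = x ++ (";" ++ PySem.Str.join ";" (y :: g)) := by
      apply String.toList_injective
      simp [PySem.Str.toList_join, PySem.Chars.join_cons_cons]
    rw [h2, ih y, List.foldl_cons, foldJoin_prefix g x (";" ++ y), foldJoin_prefix g ";" y]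

theorem updLastA_append : ∀ (l2 : List String) (z line : String),
    updLastA (l2 ++ [z]) line = l2 ++ [z ++ (";" ++ line)]
  | [], _, _ => rfl
  | [_], _, _ => rfl
  | w :: v :: l2, z, line => by
    have ih := updLastA_append (v :: l2) z line
    simp only [List.cons_append, updLastA] at ih ⊢
    rw [ih]

-- A's fold over a run of CZ lines with empty accumulator joins into the last 2Q entry
theorem foldA_CZ_merge (g : List String) (h : ∀ x ∈ g, isCZ x = true) :
    ∀ (z : String) l1 l2, g.foldl stepA (l1, l2 ++ [z], []) =
      (l1, l2 ++ [g.foldl (fun b s => b ++ (";" ++ s)) z], []) := by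
  induction g with
  | nil => intro z l1 l2; simp
  | cons x g ih =>
    intro z l1 l2
    have hx : isCZ x = true := h x (by simp)
    simp only [List.foldl_cons, stepA, hx, if_true]
    simp only [BEq.rfl, if_true]
    rw [updLastA_append]
    exact ih (fun y hy => h y (by simp [hy])) (z ++ (";" ++ x)) l1 l2

theorem head_dropWhile_false {α : Type} (p : α → Bool) (l : List α) (y : α) (ys : List α)
    (h : l.dropWhile p = y :: ys) : p y = false := by
  have h1 := List.head?_dropWhile_not p l
  rw [h] at h1
  simpa using h1

-- the main invariant: A's per-line fold equals B's per-group fold, provided the pending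
-- accumulator is empty exactly when the next line is not a CZ line
theorem main_inv : ∀ (n : Nat) (script : List String), script.length ≤ n →
    ∀ (l1 : List (List String)) (l2 : List String) (p : List String),
    (match script with
     | [] => True
     | x :: _ => if isCZ x then p ≠ [] else p = []) →
    script.foldl stepA (l1, l2, p) = (groupsB script).foldl stepB (l1, l2, p) := by
  intro n
  induction n with
  | zero =>
    intro script hlen l1 l2 p _
    have : script = [] := List.eq_nil_of_length_eq_zero (Nat.le_zero.mp hlen)
    subst this; simp [groupsB]
  | succ n ih =>
    intro script hlen l1 l2 p hcond
    cases script with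
    | nil => simp [groupsB]
    | cons x rest =>
      set P := fun y => isCZ y == isCZ x with hP
      have hsplit : rest = rest.takeWhile P ++ rest.dropWhile P :=
        (List.takeWhile_append_dropWhile).symm
      have hrestlen : (rest.dropWhile P).length ≤ n := by
        have := List.length_dropWhile_le P rest
        simp at hlen; omega
      have hrun : ∀ y ∈ rest.takeWhile P, isCZ y = isCZ x := by
        intro y hy
        have := List.mem_takeWhile_imp hy
        simpa [hP] using this
      cases hxcz : isCZ x with
      | true =>
        have hp : p ≠ [] := by simpa [hxcz] using hcond
        have hpb : (p == ([] : List String)) = false := by simpa using hp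
        have hfold1 : (x :: rest).foldl stepA (l1, l2, p)
            = (rest.dropWhile P).foldl stepA
                ((rest.takeWhile P).foldl stepA (l1 ++ [p], l2 ++ [x], [])) := by
          conv_lhs => rw [show (x :: rest) = [x] ++ rest.takeWhile P ++ rest.dropWhile P by
            simp [← hsplit]]
          simp only [List.foldl_append, List.foldl_cons, List.foldl_nil]
          congr 1
          simp only [stepA, hxcz, if_true, hpb, Bool.false_eq_true, if_false]
        rw [hfold1, foldA_CZ_merge (rest.takeWhile P)
              (by intro y hy; rw [hrun y hy, hxcz]) x (l1 ++ [p]) l2]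
        rw [groupsB_cons, List.foldl_cons]
        have hstepB : stepB (l1, l2, p) (isCZ x, x :: rest.takeWhile P)
            = (l1 ++ [p], l2 ++ [(rest.takeWhile P).foldl (fun b s => b ++ (";" ++ s)) x], []) := by
          simp only [stepB, hxcz, if_true]
          rw [join_eq_foldl]
        rw [hstepB]
        apply ih _ hrestlen
        cases hd : rest.dropWhile P with
        | nil => trivial
        | cons y ys =>
          have h1 : P y = false := head_dropWhile_false P rest y ys hd
          have h2 : isCZ y = false := by
            simp [hP, hxcz] at h1; simpa using h1
          simp [h2]
      | false =>
        have hp : p = [] := by simpa [hxcz] using hcond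
        subst hp
        have hfold1 : (x :: rest).foldl stepA (l1, l2, [])
            = (rest.dropWhile P).foldl stepA (l1, l2, x :: rest.takeWhile P) := by
          conv_lhs => rw [show (x :: rest) = [x] ++ rest.takeWhile P ++ rest.dropWhile P by
            simp [← hsplit]]
          simp only [List.foldl_append, List.foldl_cons, List.foldl_nil]
          rw [show stepA (l1, l2, ([] : List String)) x = (l1, l2, [x]) by
            simp [stepA, hxcz]]
          rw [foldA_nonCZ (rest.takeWhile P)
                (by intro y hy; rw [hrun y hy, hxcz]) l1 l2 [x]]
          simp
        rw [hfold1, groupsB_cons, List.foldl_cons]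
        have hstepB : stepB (l1, l2, ([] : List String)) (isCZ x, x :: rest.takeWhile P)
            = (l1, l2, x :: rest.takeWhile P) := by
          simp [stepB, hxcz]
        rw [hstepB]
        apply ih _ hrestlen
        cases hd : rest.dropWhile P with
        | nil => trivial
        | cons y ys =>
          have h1 : P y = false := head_dropWhile_false P rest y ys hd
          have h2 : isCZ y = true := by
            simp [hP, hxcz] at h1; simpa using h1
          simp [h2]

-- ===== VERDICT (by name: the statement is the Claim_ definition above) =====
theorem split_entangling_spec : Claim_equal_split_entangling := by
  intro script _hDom hPre
  unfold Spec_split_entangling split_entangling split_entangling_alt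
  rw [main_inv script.length script (le_refl _)]
  cases script with
  | nil => trivial
  | cons x rest =>
    have hx : isCZ x = false := by
      rw [isCZ_eq_take]
      unfold Pre_split_entangling at hPre
      simpa using hPre
    simp [hx]
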